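-- pv_equiv track=rewrite | github.com/antonk404/quiz-solver-stepik | browser_handler.py | _normalize_choice_indices_fast
-- ===== SOURCE A (Python) =====
-- def _normalize_choice_indices_fast(
--     selected_indices: list[int], options_count: int
-- ) -> list[int]:
--     normalized, seen = [], set()
--     for raw in selected_indices:
--         if isinstance(raw, int) and 0 <= raw < options_count and raw not in seen:
--             seen.add(raw)
--             normalized.append(raw)
--     return normalized
-- ===== SOURCE B (Python) =====
-- def _normalize_choice_indices_fast(
--     selected_indices: list[int], options_count: int
-- ) -> list[int]:
--     # Positional first-occurrence scheme: build a first-occurrence index map by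
--     # overwriting in a single backwards pass (no membership test anywhere),
--     # then keep each valid element exactly at its first-occurrence position.
--     first = {}
--     for i, raw in reversed(list(enumerate(selected_indices))):
--         first[raw] = i
--     return [
--         raw
--         for i, raw in enumerate(selected_indices)
--         if isinstance(raw, int) and 0 <= raw < options_count and first[raw] == i
--     ]
-- ===== Notes on version B (the rewrite author's own statement) =====
-- stated objective: alternative
-- what changed: Replaces A's single pass with an incrementally maintained 'seen' set by a positional scheme: a backwards overwrite pass builds a first-occurrence index map with no membership test, and a second pass keeps each valid element exactly at its first-occurrence position.
import Mathlib
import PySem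

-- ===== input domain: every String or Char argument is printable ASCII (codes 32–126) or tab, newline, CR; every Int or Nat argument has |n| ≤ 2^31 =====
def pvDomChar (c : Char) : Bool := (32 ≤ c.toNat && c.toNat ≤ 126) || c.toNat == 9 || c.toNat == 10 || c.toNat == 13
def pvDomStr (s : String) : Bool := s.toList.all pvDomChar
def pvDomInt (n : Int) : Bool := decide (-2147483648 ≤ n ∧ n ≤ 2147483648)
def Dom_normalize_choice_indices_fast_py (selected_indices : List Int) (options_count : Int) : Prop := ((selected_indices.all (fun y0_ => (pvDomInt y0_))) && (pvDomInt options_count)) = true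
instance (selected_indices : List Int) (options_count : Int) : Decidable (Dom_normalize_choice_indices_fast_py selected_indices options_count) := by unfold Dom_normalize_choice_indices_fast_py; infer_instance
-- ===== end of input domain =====

-- ===== PORT A =====
-- One honest line: B replaces A's incremental seen-set pass by a backwards-built first-occurrence index map plus a positional filter (alternative; not claimed faster).
def normalize_choice_indices_fast_py (selected_indices : List Int) (options_count : Int) : List Int :=
  (selected_indices.foldl
    (fun (st : List Int × PySem.Set Int) raw =>
      if (decide (0 ≤ raw) && decide (raw < options_count)) && !(PySem.Set.contains st.2 raw) then
        (st.1 ++ [raw], PySem.Set.add st.2 raw)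
      else st)
    ([], PySem.Set.empty)).1

-- ===== PORT B =====
-- 'first[raw]' in Source B is a plain dict subscript; every element of the list is a key of
-- 'first' (the first pass inserts all of them), so KeyError is unreachable and the port
-- reads it as get? with the junk default -1 (never equal to an enumerate index, which is ≥ 0).
def normalize_choice_indices_fast_py_alt (selected_indices : List Int) (options_count : Int) : List Int :=
  let first : PySem.Dict Int Int :=
    (PySem.List.enumerate selected_indices).reverse.foldl
      (fun d p => d.insert p.2 p.1) PySem.Dict.empty
  ((PySem.List.enumerate selected_indices).filter
      (fun p => (decide (0 ≤ p.2) && decide (p.2 < options_count))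
        && ((first.get? p.2).getD (-1) == p.1))).map (fun p => p.2)

-- ===== PRECONDITION & SPEC =====
def Spec_normalize_choice_indices_fast_py (selected_indices : List Int) (options_count : Int) (out : List Int) : Prop := out = normalize_choice_indices_fast_py_alt selected_indices options_count
instance (selected_indices : List Int) (options_count : Int) (out : List Int) : Decidable (Spec_normalize_choice_indices_fast_py selected_indices options_count out) := by unfold Spec_normalize_choice_indices_fast_py; infer_instance

-- ===== CLAIM (what is proved, stated in full; the proofs are below) =====
def Claim_equal_normalize_choice_indices_fast_py : Prop := ∀ (selected_indices : List Int) (options_count : Int), Dom_normalize_choice_indices_fast_py selected_indices options_count → Spec_normalize_choice_indices_fast_py selected_indices options_count (normalize_choice_indices_fast_py selected_indices options_count)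

-- ===== LEMMAS AND PROOFS =====

-- A's loop: from state (s, s) the fold computes Set-adds of exactly the filtered elements.
theorem pv_loop_eq (options_count : Int) (xs : List Int) (s : PySem.Set Int) :
    xs.foldl
      (fun (st : List Int × PySem.Set Int) raw =>
        if (decide (0 ≤ raw) && decide (raw < options_count)) && !(PySem.Set.contains st.2 raw) then
          (st.1 ++ [raw], PySem.Set.add st.2 raw)
        else st)
      (s, s)
    = ((xs.filter (fun raw => decide (0 ≤ raw) && decide (raw < options_count))).foldl
         PySem.Set.add s,
       (xs.filter (fun raw => decide (0 ≤ raw) && decide (raw < options_count))).foldl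
         PySem.Set.add s) := by
  induction xs generalizing s with
  | nil => rfl
  | cons x xs ih =>
    by_cases hp : (0 ≤ x ∧ x < options_count)
    · have hfil : (x :: xs).filter (fun raw => decide (0 ≤ raw) && decide (raw < options_count))
          = x :: xs.filter (fun raw => decide (0 ≤ raw) && decide (raw < options_count)) := by
        simp [hp.1, hp.2]
      by_cases hc : x ∈ s
      · have hadd : PySem.Set.add s x = s := by simp [PySem.Set.add, hc]
        rw [List.foldl_cons, if_neg (by simp [hc]), hfil, List.foldl_cons, hadd]
        exact ih s
      · have hadd : PySem.Set.add s x = s ++ [x] := by simp [PySem.Set.add, hc]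
        rw [List.foldl_cons, if_pos (by simp [hp.1, hp.2, hc]), hfil, List.foldl_cons, hadd]
        exact ih (s ++ [x])
    · have hfil : (x :: xs).filter (fun raw => decide (0 ≤ raw) && decide (raw < options_count))
          = xs.filter (fun raw => decide (0 ≤ raw) && decide (raw < options_count)) := by
        simp only [List.filter_cons, if_neg (by simpa [Decidable.not_and_iff_not_or_not] using hp :
          ¬ (decide (0 ≤ x) && decide (x < options_count)) = true)]
      rw [List.foldl_cons,
        if_neg (by simp; tauto), hfil]
      exact ih s

-- The backwards insert loop: the LAST insert for a key wins, i.e. the FIRST pair of l with that value.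
theorem pv_get_rev_insert (l : List (Int × Int)) (d : PySem.Dict Int Int) (x : Int) :
    (l.reverse.foldl (fun d p => d.insert p.2 p.1) d).get? x
      = (match l.find? (fun p => p.2 == x) with
         | some p => some p.1
         | none => d.get? x) := by
  induction l generalizing d with
  | nil => rfl
  | cons p t ih =>
    rw [List.reverse_cons, List.foldl_append]
    simp only [List.foldl_cons, List.foldl_nil, List.find?_cons]
    rw [PySem.Dict.get?_insert]
    by_cases h : x = p.2
    · simp [h]
    · rw [if_neg h, ih]
      have : (p.2 == x) = false := by simp; exact fun he => h he.symm
      simp [this]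

-- find? over enumerate finds the first occurrence, as index? shifted by the start.
theorem pv_find_enumerate (x : Int) (xs : List Int) :
    ∀ (s : Int), (PySem.List.enumerate xs s).find? (fun p => p.2 == x)
      = (PySem.List.index? xs x).map (fun k => (s + (k : Int), x)) := by
  induction xs with
  | nil => intro s; rfl
  | cons y t ih =>
    intro s
    rw [PySem.List.enumerate_cons, List.find?_cons]
    by_cases h : y = x
    · subst h
      simp [PySem.List.index?, List.idxOf?_cons]
    · have hb : (((s, y) : Int × Int).2 == x) = false := by simpa using h
      rw [hb, ih (s + 1)]
      have hidx : PySem.List.index? (y :: t) x = (PySem.List.index? t x).map (· + 1) := by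
        simp [PySem.List.index?, List.idxOf?_cons, h]
      rw [hidx]
      cases PySem.List.index? t x with
      | none => rfl
      | some k => simp; ring

-- The first-occurrence map: get? is index?, cast to Int.
theorem pv_first_get (xs : List Int) (x : Int) :
    ((PySem.List.enumerate xs).reverse.foldl
        (fun (d : PySem.Dict Int Int) p => d.insert p.2 p.1) PySem.Dict.empty).get? x
      = (PySem.List.index? xs x).map (fun k => (k : Int)) := by
  rw [pv_get_rev_insert, pv_find_enumerate x xs 0]
  cases PySem.List.index? xs x with
  | none => simp [PySem.Dict.get?_empty]
  | some k => simp

-- Appending an element already present does not move first occurrences.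
theorem pv_index_append_mem (xs : List Int) (x y : Int) (hy : y ∈ xs) :
    PySem.List.index? (xs ++ [x]) y = PySem.List.index? xs y := by
  induction xs with
  | nil => cases hy
  | cons a t ih =>
    by_cases h : a = y
    · subst h; simp [PySem.List.index?, List.idxOf?_cons]
    · have hyt : y ∈ t := by cases hy with
        | head => exact absurd rfl h
        | tail _ h' => exact h'
      simp only [List.cons_append]
      simp [PySem.List.index?, List.idxOf?_cons, h] at ih ⊢
      rw [ih hyt]

-- The positional filter over enumerate computes exactly the ordered dedup (Set.ofList) of the filtered list.
theorem pv_positional_eq_ofList (n : Int) (xs : List Int) :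
    ((PySem.List.enumerate xs).filter
        (fun p => (decide (0 ≤ p.2) && decide (p.2 < n))
          && (((PySem.List.index? xs p.2).map (fun k => (k : Int))).getD (-1) == p.1))).map (fun p => p.2)
      = PySem.Set.ofList (xs.filter (fun raw => decide (0 ≤ raw) && decide (raw < n))) := by
  induction xs using List.reverseRecOn with
  | nil => rfl
  | append_singleton l x ih =>
    rw [PySem.List.enumerate_append, List.filter_append, List.map_append]
    have hpre : (PySem.List.enumerate l).filter
        (fun p => (decide (0 ≤ p.2) && decide (p.2 < n))
          && (((PySem.List.index? (l ++ [x]) p.2).map (fun k => (k : Int))).getD (-1) == p.1))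
        = (PySem.List.enumerate l).filter
        (fun p => (decide (0 ≤ p.2) && decide (p.2 < n))
          && (((PySem.List.index? l p.2).map (fun k => (k : Int))).getD (-1) == p.1)) := by
      apply List.filter_congr
      intro p hp
      have hmem : p.2 ∈ l := by
        rcases (PySem.List.mem_enumerate_iff _ _ _).1 hp with ⟨k, hk, rfl⟩
        simp
      rw [pv_index_append_mem l x p.2 hmem]
    rw [hpre, ih]
    -- the appended element
    have hfilapp : (l ++ [x]).filter (fun raw => decide (0 ≤ raw) && decide (raw < n))
        = l.filter (fun raw => decide (0 ≤ raw) && decide (raw < n))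
          ++ (if (decide (0 ≤ x) && decide (x < n)) then [x] else []) := by
      rw [List.filter_append]
      cases h : (decide (0 ≤ x) && decide (x < n)) <;> simp [List.filter, h]
    rw [hfilapp]
    by_cases hv : ((decide (0 ≤ x) && decide (x < n)) = true)
    · rw [if_pos hv]
      have hof : PySem.Set.ofList (l.filter (fun raw => decide (0 ≤ raw) && decide (raw < n)) ++ [x])
          = PySem.Set.add (PySem.Set.ofList (l.filter (fun raw => decide (0 ≤ raw) && decide (raw < n)))) x := by
        rw [PySem.Set.ofList_eq_foldl, PySem.Set.ofList_eq_foldl, List.foldl_append]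
        rfl
      rw [hof]
      by_cases hx : x ∈ l
      · -- first occurrence of x is inside l: the appended pair is dropped, and Set.add is a no-op
        have hidx : PySem.List.index? (l ++ [x]) x = PySem.List.index? l x :=
          pv_index_append_mem l x x hx
        have hsome : ∃ k, PySem.List.index? l x = some k ∧ k < l.length := by
          rcases (PySem.List.index?_isSome_iff _ _).2 hx with h
          rcases Option.isSome_iff_exists.1 h with ⟨k, hk⟩
          refine ⟨k, hk, ?_⟩
          have := (PySem.List.index?_eq_some_iff _ _ _).1 hk
          rcases this with ⟨pre, suf, hsplit, hlen, _⟩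
          subst hlen
          rw [hsplit]; simp
        rcases hsome with ⟨k, hk, hklen⟩
        have hdrop : (((PySem.List.enumerate [x] (0 + (l.length : Int))).filter
            (fun p => (decide (0 ≤ p.2) && decide (p.2 < n))
              && (((PySem.List.index? (l ++ [x]) p.2).map (fun kk => (kk : Int))).getD (-1) == p.1))))
            = [] := by
          rw [PySem.List.enumerate_cons]
          simp only [List.filter]
          rw [hidx, hk]
          have hne : (((k : Nat) : Int) == (l.length : Int)) = false := by
            simp
            omega
          simp [hv, hne]
        rw [hdrop]
        have hmemset : x ∈ PySem.Set.ofList (l.filter (fun raw => decide (0 ≤ raw) && decide (raw < n))) := by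
          rw [PySem.Set.mem_ofList]
          rcases (by simpa using hv : 0 ≤ x ∧ x < n) with ⟨h1, h2⟩
          simp [hx, h1, h2]
        simp [PySem.Set.add, hmemset]
      · -- x is new: kept by the filter, appended by Set.add
        have hidx : PySem.List.index? (l ++ [x]) x = some l.length := by
          apply (PySem.List.index?_eq_some_iff _ _ _).2
          exact ⟨l, [], rfl, rfl, hx⟩
        have hkeep : (((PySem.List.enumerate [x] (0 + (l.length : Int))).filter
            (fun p => (decide (0 ≤ p.2) && decide (p.2 < n))
              && (((PySem.List.index? (l ++ [x]) p.2).map (fun kk => (kk : Int))).getD (-1) == p.1))))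
            = [(0 + (l.length : Int), x)] := by
          rw [PySem.List.enumerate_cons]
          simp only [List.filter]
          rw [hidx]
          simp [hv]
        rw [hkeep]
        have hmemset : x ∉ PySem.Set.ofList (l.filter (fun raw => decide (0 ≤ raw) && decide (raw < n))) := by
          rw [PySem.Set.mem_ofList]
          simp
          intro hxl; exact absurd hxl hx
        simp [PySem.Set.add, hmemset]
    · rw [if_neg hv]
      have hdrop : (((PySem.List.enumerate [x] (0 + (l.length : Int))).filter
          (fun p => (decide (0 ≤ p.2) && decide (p.2 < n))
            && (((PySem.List.index? (l ++ [x]) p.2).map (fun kk => (kk : Int))).getD (-1) == p.1))))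
          = [] := by
        rw [PySem.List.enumerate_cons]
        simp only [List.filter]
        simp [hv]
      rw [hdrop]
      simp

-- ===== VERDICT (by name: the statement is the Claim_ definition above) =====
theorem normalize_choice_indices_fast_py_spec : Claim_equal_normalize_choice_indices_fast_py := by
  intro selected_indices options_count _
  unfold Spec_normalize_choice_indices_fast_py
  unfold normalize_choice_indices_fast_py normalize_choice_indices_fast_py_alt
  rw [show (PySem.Set.empty : PySem.Set Int) = ([] : List Int) from rfl]
  rw [pv_loop_eq]
  simp only
  have hfirst : ∀ p : Int × Int,
      ((((PySem.List.enumerate selected_indices).reverse.foldl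
          (fun (d : PySem.Dict Int Int) p => d.insert p.2 p.1) PySem.Dict.empty).get? p.2).getD (-1) == p.1)
      = (((PySem.List.index? selected_indices p.2).map (fun k => (k : Int))).getD (-1) == p.1) := by
    intro p; rw [pv_first_get]
  simp only [hfirst]
  rw [pv_positional_eq_ofList, PySem.Set.ofList_eq_foldl]
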